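-- pv_equiv track=rewrite | github.com/Aroton/AroMCP | src/aromcp/analysis_server/tools/find_import_cycles.py | _calculate_cycle_impact
-- ===== SOURCE A (Python) =====
-- def _calculate_cycle_impact(cycle_files: list[str], graph: dict[str, list[str]]) -> str:
--     """Calculate impact level of a cycle.
--
--     Args:
--         cycle_files: Files in the cycle
--         graph: Dependency graph
--
--     Returns:
--         Impact level string
--     """
--     # Count how many other files depend on files in the cycle
--     dependents = set()
--     for file in graph:
--         if file not in cycle_files:
--             dependencies = graph.get(file, [])
--             if any(dep in cycle_files for dep in dependencies):
--                 dependents.add(file)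
--
--     dependent_count = len(dependents)
--
--     if dependent_count > 10:
--         return "high"
--     elif dependent_count > 3:
--         return "medium"
--     else:
--         return "low"
-- ===== SOURCE B (Python) =====
-- def _calculate_cycle_impact(cycle_files: list[str], graph: dict[str, list[str]]) -> str:
--     """Classify the impact of a cycle via a reverse dependency index."""
--     # Index predecessors once: reverse[dep] lists every file that depends on dep.
--     reverse = {}
--     for file, deps in graph.items():
--         for dep in deps:
--             reverse.setdefault(dep, []).append(file)
--
--     # Look up only the cycle's files in the index.
--     dependents = set()
--     for cyc in cycle_files:
--         dependents.update(reverse.get(cyc, []))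
--     dependents -= set(cycle_files)
--
--     n = len(dependents)
--     if n > 10:
--         return "high"
--     if n > 3:
--         return "medium"
--     return "low"
-- ===== Notes on version B (the rewrite author's own statement) =====
-- stated objective: faster
-- what changed: Instead of scanning every graph entry and testing each of its deps for membership in the cycle list, B builds a reverse dependency index (dep -> dependants) in one pass over the graph and then unions only the cycle files' predecessor lists, subtracting the cycle itself.
import Mathlib
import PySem

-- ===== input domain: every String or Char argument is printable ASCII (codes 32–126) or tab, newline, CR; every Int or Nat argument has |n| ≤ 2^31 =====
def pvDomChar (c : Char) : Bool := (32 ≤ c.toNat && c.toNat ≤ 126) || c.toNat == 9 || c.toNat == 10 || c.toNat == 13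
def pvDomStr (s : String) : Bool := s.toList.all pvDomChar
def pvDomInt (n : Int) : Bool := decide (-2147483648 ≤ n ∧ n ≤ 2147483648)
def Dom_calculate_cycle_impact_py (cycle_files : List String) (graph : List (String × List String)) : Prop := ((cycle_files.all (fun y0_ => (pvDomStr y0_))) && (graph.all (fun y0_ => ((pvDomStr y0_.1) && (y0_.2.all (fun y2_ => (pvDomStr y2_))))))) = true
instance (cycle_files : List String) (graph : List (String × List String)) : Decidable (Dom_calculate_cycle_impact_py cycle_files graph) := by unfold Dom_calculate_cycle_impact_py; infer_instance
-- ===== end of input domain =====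

-- B replaces A's per-call scan of every graph entry by a reverse dependency index built once and queried only at the cycle's files (measured faster in a timing run; return value identical).


-- ===== PORT A =====
def calculate_cycle_impact_py (cycle_files : List String) (graph : List (String × List String)) : String :=
  let g : PySem.Dict String (List String) := PySem.Dict.ofList graph
  let dependents : PySem.Set String :=
    g.keys.foldl (fun s file =>
      if !(cycle_files.contains file) then
        let dependencies := g.getD file []
        if dependencies.any (fun dep => cycle_files.contains dep) then PySem.Set.add s file else s
      else s) PySem.Set.empty
  let dependent_count : Int := PySem.Set.len dependents
  if dependent_count > 10 then "high"
  else if dependent_count > 3 then "medium"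
  else "low"

-- ===== PORT B =====
def calculate_cycle_impact_py_alt (cycle_files : List String) (graph : List (String × List String)) : String :=
  let g : PySem.Dict String (List String) := PySem.Dict.ofList graph
  -- reverse.setdefault(dep, []).append(file)  ==  modify dep [] (· ++ [file])
  let reverse : PySem.Dict String (List String) :=
    g.items.foldl (fun r p => p.2.foldl (fun r dep => r.modify dep [] (· ++ [p.1])) r) PySem.Dict.empty
  let dependents0 : PySem.Set String :=
    cycle_files.foldl (fun s cyc => PySem.Set.update s (reverse.getD cyc [])) PySem.Set.empty
  let dependents := PySem.Set.diff dependents0 (PySem.Set.ofList cycle_files)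
  let n : Int := PySem.Set.len dependents
  if n > 10 then "high"
  else if n > 3 then "medium"
  else "low"

-- ===== PRECONDITION & SPEC =====
def Spec_calculate_cycle_impact_py (cycle_files : List String) (graph : List (String × List String)) (out : String) : Prop := out = calculate_cycle_impact_py_alt cycle_files graph
instance (cycle_files : List String) (graph : List (String × List String)) (out : String) : Decidable (Spec_calculate_cycle_impact_py cycle_files graph out) := by unfold Spec_calculate_cycle_impact_py; infer_instance

-- ===== CLAIM (what is proved, stated in full; the proofs are below) =====
def Claim_equal_calculate_cycle_impact_py : Prop := ∀ (cycle_files : List String) (graph : List (String × List String)), Dom_calculate_cycle_impact_py cycle_files graph → Spec_calculate_cycle_impact_py cycle_files graph (calculate_cycle_impact_py cycle_files graph)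

-- ===== LEMMAS AND PROOFS =====

-- ===== VERDICT (by name: the statement is the Claim_ definition above) =====
-- pairs (dep, file) in traversal order of B's nested reverse-index loop
def pvPairs (g : PySem.Dict String (List String)) : List (String × String) :=
  g.items.flatMap (fun p => p.2.map (fun dep => (dep, p.1)))

theorem nested_foldl_eq_pairs (g : PySem.Dict String (List String)) :
    g.items.foldl (fun r p => p.2.foldl (fun r dep => r.modify dep [] (· ++ [p.1])) r) PySem.Dict.empty
      = (pvPairs g).foldl (fun r q => r.modify q.1 [] (· ++ [q.2])) PySem.Dict.empty := by
  unfold pvPairs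
  generalize PySem.Dict.empty = d
  induction g.items generalizing d with
  | nil => rfl
  | cons p rest ih =>
      simp only [List.foldl_cons, List.flatMap_cons, List.foldl_append, List.foldl_map]
      exact ih _

theorem mem_pairs_filter (g : PySem.Dict String (List String)) (c y : String) :
    (y ∈ ((pvPairs g).filter (fun q => q.1 == c)).map (·.2)) ↔
      ∃ deps, (y, deps) ∈ g.items ∧ c ∈ deps := by
  simp only [pvPairs, List.mem_map, List.mem_filter, List.mem_flatMap]
  constructor
  · rintro ⟨q, ⟨⟨⟨k, deps⟩, hmem, hin⟩, hc⟩, hy⟩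
    obtain ⟨dep, hdep, heq⟩ := hin
    subst heq
    simp only [beq_iff_eq] at hc
    subst hc
    cases hy
    exact ⟨deps, hmem, hdep⟩
  · rintro ⟨deps, hmem, hc⟩
    exact ⟨(c, y), ⟨⟨(y, deps), hmem, ⟨c, hc, rfl⟩⟩, by simp⟩, rfl⟩

theorem mem_foldA (cycle_files : List String) (g : PySem.Dict String (List String))
    (l : List String) (s : PySem.Set String) (hs : s.Nodup) (y : String) :
    (y ∈ l.foldl (fun s file =>
      if !(cycle_files.contains file) then
        if (g.getD file []).any (fun dep => cycle_files.contains dep) then PySem.Set.add s file else s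
      else s) s)
    ↔ y ∈ s ∨ (y ∈ l ∧ ¬ (y ∈ cycle_files) ∧ ∃ dep ∈ g.getD y [], dep ∈ cycle_files) := by
  induction l generalizing s with
  | nil => simp
  | cons x xs ih =>
      simp only [List.foldl_cons]
      by_cases hx : x ∈ cycle_files
      · rw [if_neg (by simp [hx] : ¬ ((!cycle_files.contains x) = true))]
        rw [ih s hs]
        constructor
        · rintro (h | h)
          · exact Or.inl h
          · exact Or.inr ⟨List.mem_cons_of_mem _ h.1, h.2⟩
        · rintro (h | ⟨hmem, hnc, hdep⟩)
          · exact Or.inl h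
          · rcases List.mem_cons.mp hmem with rfl | hmem'
            · exact absurd hx hnc
            · exact Or.inr ⟨hmem', hnc, hdep⟩
      · rw [if_pos (by simp [hx] : (!cycle_files.contains x) = true)]
        by_cases hany : (g.getD x []).any (fun dep => cycle_files.contains dep) = true
        · rw [if_pos hany, ih _ (PySem.Set.nodup_add _ x hs), PySem.Set.mem_add]
          constructor
          · rintro ((h | rfl) | h)
            · exact Or.inl h
            · refine Or.inr ⟨List.mem_cons_self, hx, ?_⟩
              simpa [List.any_eq_true] using hany
            · exact Or.inr ⟨List.mem_cons_of_mem _ h.1, h.2⟩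
          · rintro (h | ⟨hmem, hnc, hdep⟩)
            · exact Or.inl (Or.inl h)
            · rcases List.mem_cons.mp hmem with rfl | hmem'
              · exact Or.inl (Or.inr rfl)
              · exact Or.inr ⟨hmem', hnc, hdep⟩
        · rw [if_neg hany, ih s hs]
          constructor
          · rintro (h | h)
            · exact Or.inl h
            · exact Or.inr ⟨List.mem_cons_of_mem _ h.1, h.2⟩
          · rintro (h | ⟨hmem, hnc, hdep⟩)
            · exact Or.inl h
            · rcases List.mem_cons.mp hmem with rfl | hmem'
              · exact absurd hany (by simpa [List.any_eq_true] using hdep)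
              · exact Or.inr ⟨hmem', hnc, hdep⟩

theorem nodup_foldA (cycle_files : List String) (g : PySem.Dict String (List String))
    (l : List String) (s : PySem.Set String) (hs : s.Nodup) :
    (l.foldl (fun s file =>
      if !(cycle_files.contains file) then
        if (g.getD file []).any (fun dep => cycle_files.contains dep) then PySem.Set.add s file else s
      else s) s).Nodup := by
  induction l generalizing s with
  | nil => exact hs
  | cons x xs ih =>
      simp only [List.foldl_cons]
      split
      · split
        · exact ih _ (PySem.Set.nodup_add _ x hs)
        · exact ih s hs
      · exact ih s hs

theorem mem_foldB (rev : PySem.Dict String (List String)) (l : List String)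
    (s : PySem.Set String) (y : String) :
    (y ∈ l.foldl (fun s cyc => PySem.Set.update s (rev.getD cyc [])) s)
    ↔ y ∈ s ∨ ∃ c ∈ l, y ∈ rev.getD c [] := by
  induction l generalizing s with
  | nil => simp
  | cons x xs ih =>
      simp only [List.foldl_cons]
      rw [ih]
      rw [PySem.Set.mem_update]
      constructor
      · rintro ((h | h) | ⟨c, hc, hm⟩)
        · exact Or.inl h
        · exact Or.inr ⟨x, List.mem_cons_self, h⟩
        · exact Or.inr ⟨c, List.mem_cons_of_mem _ hc, hm⟩
      · rintro (h | ⟨c, hc, hm⟩)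
        · exact Or.inl (Or.inl h)
        · rcases List.mem_cons.mp hc with rfl | hc'
          · exact Or.inl (Or.inr hm)
          · exact Or.inr ⟨c, hc', hm⟩

theorem nodup_foldB (rev : PySem.Dict String (List String)) (l : List String)
    (s : PySem.Set String) (hs : s.Nodup) :
    (l.foldl (fun s cyc => PySem.Set.update s (rev.getD cyc [])) s).Nodup := by
  induction l generalizing s with
  | nil => exact hs
  | cons x xs ih => exact ih _ (PySem.Set.nodup_update _ _ hs)

theorem calculate_cycle_impact_py_spec : Claim_equal_calculate_cycle_impact_py := by
  intro cycle_files graph _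
  unfold Spec_calculate_cycle_impact_py
  unfold calculate_cycle_impact_py calculate_cycle_impact_py_alt
  simp only []
  set g : PySem.Dict String (List String) := PySem.Dict.ofList graph with hg
  have hnd : g.keys.Nodup := PySem.Dict.nodup_keys_ofList graph
  -- A's set
  set sa := g.keys.foldl (fun s file =>
      if !(cycle_files.contains file) then
        if (g.getD file []).any (fun dep => cycle_files.contains dep) then PySem.Set.add s file else s
      else s) PySem.Set.empty with hsa
  -- B's reverse index and set
  set rev := g.items.foldl (fun r p => p.2.foldl (fun r dep => r.modify dep [] (· ++ [p.1])) r) PySem.Dict.empty with hrev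
  set sb0 := cycle_files.foldl (fun s cyc => PySem.Set.update s (rev.getD cyc [])) PySem.Set.empty with hsb0
  set sb := PySem.Set.diff sb0 (PySem.Set.ofList cycle_files) with hsb
  have hrevD : ∀ c, rev.getD c [] = ((pvPairs g).filter (fun q => q.1 == c)).map (·.2) := by
    intro c
    rw [hrev, nested_foldl_eq_pairs, PySem.Dict.getD_foldl_modify_append]
    simp
  have hmem : ∀ y, y ∈ sa ↔ y ∈ sb := by
    intro y
    rw [hsa, mem_foldA cycle_files g g.keys PySem.Set.empty (by simp [PySem.Set.empty]) y]
    rw [hsb, PySem.Set.mem_diff, hsb0, mem_foldB, PySem.Set.mem_ofList]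
    simp only [List.not_mem_nil, false_or, PySem.Set.empty]
    constructor
    · rintro ⟨hk, hnc, dep, hdep, hdc⟩
      refine ⟨⟨dep, hdc, ?_⟩, hnc⟩
      rw [hrevD, mem_pairs_filter]
      refine ⟨g.getD y [], ?_, hdep⟩
      rw [PySem.Dict.items_eq_map_keys g hnd []]
      exact List.mem_map.mpr ⟨y, hk, rfl⟩
    · rintro ⟨⟨c, hc, hm⟩, hnc⟩
      rw [hrevD, mem_pairs_filter] at hm
      obtain ⟨deps, hitems, hcd⟩ := hm
      have hyk : y ∈ g.keys := PySem.Dict.mem_keys_of_mem_items g hitems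
      have hdv : g.getD y [] = deps := PySem.Dict.getD_of_mem_items g hitems hnd []
      exact ⟨hyk, hnc, c, by rw [hdv]; exact hcd, hc⟩
  have hnda : sa.Nodup := nodup_foldA cycle_files g g.keys PySem.Set.empty (by simp [PySem.Set.empty])
  have hndb : sb.Nodup := PySem.Set.nodup_diff _ _ (nodup_foldB rev cycle_files PySem.Set.empty (by simp [PySem.Set.empty]))
  have hperm : sa.Perm sb := (List.perm_ext_iff_of_nodup hnda hndb).mpr hmem
  have hlen : PySem.Set.len sa = PySem.Set.len sb := by
    simp [PySem.Set.len, hperm.length_eq]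
  rw [hlen]
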